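-- pv_equiv track=rewrite | github.com/portolan-sdi/portolan-cli | portolan_cli/stac.py | build_stac_extensions
-- ===== SOURCE A (Python) =====
-- EXTENSION_URLS = {
--     "table": "https://stac-extensions.github.io/table/v1.2.0/schema.json",
--     "projection": "https://stac-extensions.github.io/projection/v2.0.0/schema.json",
--     "raster": "https://stac-extensions.github.io/raster/v1.1.0/schema.json",
--     "file": "https://stac-extensions.github.io/file/v2.1.0/schema.json",  # Reserved for future
--     "vector": "https://stac-extensions.github.io/vector/v0.1.0/schema.json",  # Proposal maturity
-- }
--
-- def build_stac_extensions(properties: dict[str, object]) -> list[str]: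
--     """Build stac_extensions array based on which extension fields are populated.
--
--     Scans the properties dict for extension-prefixed fields (e.g., "table:", "proj:")
--     and returns the corresponding extension schema URLs.
--
--     Args:
--         properties: Properties dict to scan for extension fields.
--
--     Returns:
--         List of extension schema URLs.
--     """
--     extensions: list[str] = []
--
--     # Check for table extension fields
--     if any(k.startswith("table:") for k in properties):
--         extensions.append(EXTENSION_URLS["table"])
--
--     # Check for projection extension fields
--     if any(k.startswith("proj:") for k in properties):
--         extensions.append(EXTENSION_URLS["projection"])
--
--     # Check for raster extension fields
--     # STAC v1.1.0 uses unified 'bands' array at top level (not raster:bands)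
--     if any(k.startswith("raster:") for k in properties) or "bands" in properties:
--         extensions.append(EXTENSION_URLS["raster"])
--
--     # Check for file extension fields
--     if any(k.startswith("file:") for k in properties):
--         extensions.append(EXTENSION_URLS["file"])
--
--     # Check for vector extension fields
--     if any(k.startswith("vector:") for k in properties):
--         extensions.append(EXTENSION_URLS["vector"])
--
--     return extensions
-- ===== SOURCE B (Python) =====
-- _ORDERED_EXTENSIONS = [
--     ("table", "https://stac-extensions.github.io/table/v1.2.0/schema.json"),
--     ("proj", "https://stac-extensions.github.io/projection/v2.0.0/schema.json"),
--     ("raster", "https://stac-extensions.github.io/raster/v1.1.0/schema.json"),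
--     ("file", "https://stac-extensions.github.io/file/v2.1.0/schema.json"),
--     ("vector", "https://stac-extensions.github.io/vector/v0.1.0/schema.json"),
-- ]
--
--
-- def build_stac_extensions(properties: dict[str, object]) -> list[str]:
--     """Single pass over the keys collecting populated prefixes, then one
--     emit pass over the canonical (prefix, url) table."""
--     prefixes = set()
--     has_bands = False
--     for k in properties:
--         if ":" in k:
--             prefixes.add(k.split(":", 1)[0])
--         elif k == "bands":
--             has_bands = True
--     out = []
--     for tag, url in _ORDERED_EXTENSIONS:
--         if tag in prefixes or (tag == "raster" and has_bands):
--             out.append(url)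
--     return out
-- ===== Notes on version B (the rewrite author's own statement) =====
-- stated objective: faster
-- what changed: Replaces five separate any()-scans of the dict by a single pass that splits each key at ':' into a set of populated prefixes (plus a 'bands' flag), followed by one emit pass over a fixed ordered (prefix, url) table.
import Mathlib
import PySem

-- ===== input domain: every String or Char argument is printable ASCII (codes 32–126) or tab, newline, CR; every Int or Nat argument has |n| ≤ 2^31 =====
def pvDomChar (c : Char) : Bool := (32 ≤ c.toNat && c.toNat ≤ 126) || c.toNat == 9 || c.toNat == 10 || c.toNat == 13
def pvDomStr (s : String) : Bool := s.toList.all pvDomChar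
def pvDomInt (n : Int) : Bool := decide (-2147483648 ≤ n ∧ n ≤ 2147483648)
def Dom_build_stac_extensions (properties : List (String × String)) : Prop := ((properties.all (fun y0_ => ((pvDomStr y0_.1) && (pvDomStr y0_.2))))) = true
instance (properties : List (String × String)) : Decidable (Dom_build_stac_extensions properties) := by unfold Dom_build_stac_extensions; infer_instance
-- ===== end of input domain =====

-- B replaces A's five separate scans of the keys by one prefix-collecting pass plus one
-- emit pass over an ordered (prefix, url) table (measured faster in a timing run).

-- ===== PORT A =====
def build_stac_extensions (properties : List (String × String)) : List String :=
  let extensions : List String := []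
  let extensions := if properties.any (fun kv => PySem.Str.startswith kv.1 "table:") then
      extensions ++ ["https://stac-extensions.github.io/table/v1.2.0/schema.json"] else extensions
  let extensions := if properties.any (fun kv => PySem.Str.startswith kv.1 "proj:") then
      extensions ++ ["https://stac-extensions.github.io/projection/v2.0.0/schema.json"] else extensions
  let extensions := if properties.any (fun kv => PySem.Str.startswith kv.1 "raster:")
      || properties.any (fun kv => kv.1 == "bands") then
      extensions ++ ["https://stac-extensions.github.io/raster/v1.1.0/schema.json"] else extensions
  let extensions := if properties.any (fun kv => PySem.Str.startswith kv.1 "file:") then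
      extensions ++ ["https://stac-extensions.github.io/file/v2.1.0/schema.json"] else extensions
  let extensions := if properties.any (fun kv => PySem.Str.startswith kv.1 "vector:") then
      extensions ++ ["https://stac-extensions.github.io/vector/v0.1.0/schema.json"] else extensions
  extensions

-- ===== PORT B =====
def pvOrderedExtensions : List (String × String) :=
  [("table", "https://stac-extensions.github.io/table/v1.2.0/schema.json"),
   ("proj", "https://stac-extensions.github.io/projection/v2.0.0/schema.json"),
   ("raster", "https://stac-extensions.github.io/raster/v1.1.0/schema.json"),
   ("file", "https://stac-extensions.github.io/file/v2.1.0/schema.json"),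
   ("vector", "https://stac-extensions.github.io/vector/v0.1.0/schema.json")]

-- one step of B's key-scanning loop; '":" in k' is 'k.toList.contains ':'' (exact for a
-- one-character needle) and 'k.split(":", 1)[0]' is 'takeWhile (· ≠ ':')' (exact: the part before the first ':')
def pvScanStep (acc : PySem.Set String × Bool) (kv : String × String) : PySem.Set String × Bool :=
  if kv.1.toList.contains ':' then
    (PySem.Set.add acc.1 (String.ofList (kv.1.toList.takeWhile (· ≠ ':'))), acc.2)
  else if kv.1 == "bands" then (acc.1, true)
  else acc

def build_stac_extensions_alt (properties : List (String × String)) : List String :=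
  let st := properties.foldl pvScanStep (PySem.Set.empty, false)
  pvOrderedExtensions.foldl
    (fun out tu =>
      if PySem.Set.contains st.1 tu.1 || (tu.1 == "raster" && st.2) then out ++ [tu.2] else out)
    []

-- ===== PRECONDITION & SPEC =====
def Spec_build_stac_extensions (properties : List (String × String)) (out : List String) : Prop := out = build_stac_extensions_alt properties
instance (properties : List (String × String)) (out : List String) : Decidable (Spec_build_stac_extensions properties out) := by unfold Spec_build_stac_extensions; infer_instance

-- ===== CLAIM (what is proved, stated in full; the proofs are below) =====
def Claim_equal_build_stac_extensions : Prop := ∀ (properties : List (String × String)), Dom_build_stac_extensions properties → Spec_build_stac_extensions properties (build_stac_extensions properties)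

-- ===== LEMMAS AND PROOFS =====

-- 'k starts with w ++ ":"' iff k contains a ':' and its part before the first ':' is w (for ':' ∉ w)
lemma pv_prefix_colon (w : List Char) (hw : ':' ∉ w) (l : List Char) :
    PySem.Chars.startswith l (w ++ [':']) = (l.contains ':' && (l.takeWhile (· ≠ ':') == w)) := by
  show (w ++ [':']).isPrefixOf l = _
  induction w generalizing l with
  | nil =>
    cases l with
    | nil => simp
    | cons c t =>
      by_cases h : c = ':'
      · simp [List.takeWhile, h]
      · have h' : ¬(':' = c) := fun hh => h hh.symm
        have hb : ((':' : Char) == c) = false := beq_eq_false_iff_ne.mpr h'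
        simp [List.isPrefixOf_cons₂, List.takeWhile, h, h', hb]
  | cons a w ih =>
    have ha : a ≠ ':' := fun h => hw (by simp [h])
    have hw' : ':' ∉ w := fun h => hw (List.mem_cons_of_mem _ h)
    cases l with
    | nil => simp
    | cons c t =>
      by_cases h : c = ':'
      · subst h
        have hb : (a == (':' : Char)) = false := beq_eq_false_iff_ne.mpr ha
        simp [List.isPrefixOf_cons₂, List.takeWhile, hb]
      · by_cases hac : a = c
        · subst hac
          have h' : ¬(':' = a) := fun hh => ha hh.symm
          simp [List.takeWhile, h, ih hw' t, h']
        · have h' : ¬(':' = c) := fun hh => h hh.symm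
          have hb1 : (a == c) = false := beq_eq_false_iff_ne.mpr hac
          have hb2 : (c == a) = false := beq_eq_false_iff_ne.mpr (fun hh => hac hh.symm)
          simp [List.isPrefixOf_cons₂, List.takeWhile, h, h', hb1, hb2]

-- one step of the scan: effect on the prefix set (membership of a colon-free word)
lemma pv_step_fst (w : List Char) (hw : ':' ∉ w) (s : PySem.Set String × Bool)
    (kv : String × String) :
    (String.ofList w ∈ (pvScanStep s kv).1) ↔
      (String.ofList w ∈ s.1 ∨ PySem.Chars.startswith kv.1.toList (w ++ [':']) = true) := by
  unfold pvScanStep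
  rw [pv_prefix_colon w hw]
  by_cases h1 : kv.1.toList.contains ':' = true
  · rw [if_pos h1]
    simp only [PySem.Set.mem_add, h1, Bool.true_and, String.ofList_inj, beq_iff_eq]
    exact or_congr_right eq_comm
  · rw [if_neg h1]
    simp only [Bool.not_eq_true] at h1
    have h1' : ':' ∉ kv.1.toList := by simpa using h1
    by_cases h2 : (kv.1 == "bands") = true
    · rw [if_pos h2]; simp [h1']
    · rw [if_neg h2]; simp [h1']

-- one step of the scan: effect on the bands flag
lemma pv_step_snd (s : PySem.Set String × Bool) (kv : String × String) :
    (pvScanStep s kv).2 = (s.2 || (kv.1 == "bands")) := by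
  unfold pvScanStep
  by_cases h1 : kv.1.toList.contains ':' = true
  · have hb : (kv.1 == "bands") = false := by
      by_contra hb
      simp only [Bool.not_eq_false, beq_iff_eq] at hb
      rw [hb] at h1
      simp at h1
    rw [if_pos h1, hb]
    simp
  · rw [if_neg h1]
    by_cases h2 : (kv.1 == "bands") = true
    · rw [if_pos h2, h2]; simp
    · rw [if_neg h2]
      simp only [Bool.not_eq_true] at h2
      rw [h2]; simp

-- the whole scan: the prefix set holds a colon-free word iff some key starts with it + ':'
lemma pv_scan_fst (w : List Char) (hw : ':' ∉ w) (props : List (String × String))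
    (s : PySem.Set String × Bool) :
    (String.ofList w ∈ (props.foldl pvScanStep s).1) ↔
      (String.ofList w ∈ s.1 ∨ props.any (fun kv => PySem.Chars.startswith kv.1.toList (w ++ [':'])) = true) := by
  induction props generalizing s with
  | nil => simp
  | cons kv props ih =>
    rw [List.foldl_cons, ih (pvScanStep s kv), pv_step_fst w hw]
    simp [or_assoc]

-- the whole scan: the bands flag records an exact "bands" key
lemma pv_scan_snd (props : List (String × String)) (s : PySem.Set String × Bool) :
    (props.foldl pvScanStep s).2 = (s.2 || props.any (fun kv => kv.1 == "bands")) := by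
  induction props generalizing s with
  | nil => simp
  | cons kv props ih =>
    rw [List.foldl_cons, ih (pvScanStep s kv), pv_step_snd]
    simp [Bool.or_assoc]

-- the scanned set, queried at one of B's table tags, equals A's any()-scan for that tag
lemma pv_contains_eq (props : List (String × String)) (tag suffixed : String)
    (hw : ':' ∉ tag.toList) (hs : suffixed.toList = tag.toList ++ [':']) :
    PySem.Set.contains (props.foldl pvScanStep (PySem.Set.empty, false)).1 tag
      = props.any (fun kv => PySem.Str.startswith kv.1 suffixed) := by
  have h := pv_scan_fst tag.toList hw props (PySem.Set.empty, false)
  rw [Bool.eq_iff_iff]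
  simp only [PySem.Set.empty, List.not_mem_nil, false_or, String.ofList_toList] at h
  simp [PySem.Set.contains, h, PySem.Str.startswith_eq, hs]

-- ===== VERDICT (by name: the statement is the Claim_ definition above) =====
theorem build_stac_extensions_spec : Claim_equal_build_stac_extensions := by
  intro props _
  unfold Spec_build_stac_extensions build_stac_extensions build_stac_extensions_alt pvOrderedExtensions
  simp only [List.foldl_cons, List.foldl_nil]
  rw [pv_contains_eq props "table" "table:" (by decide) (by decide),
      pv_contains_eq props "proj" "proj:" (by decide) (by decide),
      pv_contains_eq props "raster" "raster:" (by decide) (by decide),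
      pv_contains_eq props "file" "file:" (by decide) (by decide),
      pv_contains_eq props "vector" "vector:" (by decide) (by decide),
      pv_scan_snd props (PySem.Set.empty, false)]
  simp only [show (("table" : String) == "raster") = false from rfl,
    show (("proj" : String) == "raster") = false from rfl,
    show (("raster" : String) == "raster") = true from rfl,
    show (("file" : String) == "raster") = false from rfl,
    show (("vector" : String) == "raster") = false from rfl,
    Bool.false_and, Bool.true_and, Bool.or_false, Bool.false_or]
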